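-- pv_equiv track=rewrite | github.com/finanalyzer/tdx | openbb_tdx/models/equity_search.py | _is_valid_symbol
-- ===== SOURCE A (Python) =====
-- def _is_valid_symbol(query_str: str) -> bool:
--     """Check if the query string is a valid symbol format.
--
--     Valid formats:
--     - 5 or 6 digit numeric string (e.g., "000001", "00300")
--     - Symbol with market suffix (e.g., "600000.SH", "00700.HK")
--     """
--     if not query_str:
--         return False
--
--     suffixes = [".SS", ".SH", ".HK", ".BJ", ".SZ"]
--     for suffix in suffixes:
--         if query_str.endswith(suffix):
--             base = query_str[:-len(suffix)]
--             return base.isdigit() and len(base) in [5, 6]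
--
--     return query_str.isdigit() and len(query_str) in [5, 6]
-- ===== SOURCE B (Python) =====
-- def _is_valid_symbol(query_str: str) -> bool:
--     # Single forward scan: count the leading run of digits; the string is valid
--     # iff that run has length 5 or 6 and is followed by nothing, or by '.' and
--     # a two-letter market code.
--     i = 0
--     n = len(query_str)
--     while i < n and query_str[i].isdigit():
--         i += 1
--     if i not in (5, 6):
--         return False
--     if i == n:
--         return True
--     return query_str[i] == '.' and query_str[i + 1:] in ('SS', 'SH', 'HK', 'BJ', 'SZ')
-- ===== Notes on version B (the rewrite author's own statement) =====
-- stated objective: alternative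
-- what changed: Instead of A's suffix-stripping strategy (try five endswith tests and validate the stripped base, else validate the whole string), B makes one forward scan that counts the leading digit run and then checks that the run has length 5 or 6 and is followed by nothing or by '.' plus a two-letter market code.
import Mathlib
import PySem

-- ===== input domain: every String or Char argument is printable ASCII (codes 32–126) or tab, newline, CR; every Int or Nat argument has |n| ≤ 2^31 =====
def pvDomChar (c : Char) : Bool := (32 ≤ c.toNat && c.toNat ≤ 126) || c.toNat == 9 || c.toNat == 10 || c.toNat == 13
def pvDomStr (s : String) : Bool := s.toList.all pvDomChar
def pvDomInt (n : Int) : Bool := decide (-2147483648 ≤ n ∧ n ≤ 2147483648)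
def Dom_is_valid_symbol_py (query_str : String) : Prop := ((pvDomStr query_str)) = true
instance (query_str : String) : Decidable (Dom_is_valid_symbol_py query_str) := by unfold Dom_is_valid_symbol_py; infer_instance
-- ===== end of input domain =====

-- B replaces A's suffix-stripping (five endswith tests, then validate the stripped base)
-- by a single forward scan that counts the leading digit run and checks what follows it
-- (objective: alternative).

-- ===== PORT A =====
-- the 'for suffix in suffixes' loop: first matching suffix returns, else fall through
def pvLoopA (cs : List Char) : List (List Char) → Bool
  | [] => PySem.Chars.strIsdigit cs && ([5, 6].contains cs.length)
  | suf :: rest =>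
    if PySem.Chars.endswith cs suf then
      let base := PySem.Chars.slice cs none (some (-(suf.length : Int)))   -- query_str[:-len(suffix)]
      PySem.Chars.strIsdigit base && ([5, 6].contains base.length)
    else pvLoopA cs rest

def is_valid_symbol_py (query_str : String) : Bool :=
  let cs := query_str.toList
  if cs.isEmpty then false
  else pvLoopA cs [['.','S','S'], ['.','S','H'], ['.','H','K'], ['.','B','J'], ['.','S','Z']]

-- ===== PORT B =====
-- the while loop 'while i < n and query_str[i].isdigit(): i += 1' leaves i = the length of
-- the leading digit run (= takeWhile); then Source B's three early-return checks in order
def is_valid_symbol_py_alt (query_str : String) : Bool :=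
  let cs := query_str.toList
  let i := (cs.takeWhile PySem.Chars.isdigit).length
  if ([5, 6].contains i) = false then false
  else if i = cs.length then true
  else (PySem.List.pyGet? cs (i : Int) == some '.') &&
       ([['S','S'], ['S','H'], ['H','K'], ['B','J'], ['S','Z']].contains
         (PySem.List.slice cs (some ((i : Int) + 1)) none))

-- ===== PRECONDITION & SPEC =====
def Spec_is_valid_symbol_py (query_str : String) (out : Bool) : Prop := out = is_valid_symbol_py_alt query_str
instance (query_str : String) (out : Bool) : Decidable (Spec_is_valid_symbol_py query_str out) := by unfold Spec_is_valid_symbol_py; infer_instance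

-- ===== CLAIM (what is proved, stated in full; the proofs are below) =====
def Claim_equal_is_valid_symbol_py : Prop := ∀ (query_str : String), Dom_is_valid_symbol_py query_str → Spec_is_valid_symbol_py query_str (is_valid_symbol_py query_str)

-- ===== LEMMAS AND PROOFS =====
theorem pv_isdigit_dot : PySem.Chars.isdigit '.' = false := by decide

-- takeWhile/dropWhile across an all-true block followed by a failing element
theorem pv_tdw {p : Char → Bool} (xs : List Char) (ys : List Char) (y : Char)
    (h : xs.all p = true) (hy : p y = false) :
    (xs ++ y :: ys).takeWhile p = xs ∧ (xs ++ y :: ys).dropWhile p = y :: ys := by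
  induction xs with
  | nil => simp [hy]
  | cons a t ih =>
    simp only [List.all_cons, Bool.and_eq_true] at h
    obtain ⟨ha, ht⟩ := h
    have h2 := ih ht
    simp [ha, h2.1, h2.2]

theorem pv_drop_head {p : Char → Bool} :
    ∀ (l : List Char) (x : Char) (r : List Char), l.dropWhile p = x :: r → p x = false := by
  intro l
  induction l with
  | nil => intro x r h; simp [List.dropWhile] at h
  | cons a t ih =>
    intro x r h
    by_cases ha : p a = true
    · rw [List.dropWhile_cons, if_pos ha] at h; exact ih x r h
    · rw [List.dropWhile_cons, if_neg ha] at h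
      obtain ⟨rfl, _⟩ := List.cons.injEq .. ▸ h
      simpa using ha

-- an all-digit string cannot end with a suffix that starts with '.'
theorem pv_ew_dot (cs : List Char) (h : cs.all PySem.Chars.isdigit = true) (s : List Char) :
    PySem.Chars.endswith cs ('.' :: s) = false := by
  cases hE : PySem.Chars.endswith cs ('.' :: s)
  · rfl
  · rw [PySem.Chars.endswith_iff] at hE
    obtain ⟨pre, hpre⟩ := hE
    have hmem : PySem.Chars.isdigit '.' = true :=
      List.all_eq_true.mp h '.' (by rw [← hpre]; simp)
    simp [pv_isdigit_dot] at hmem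

theorem pv_ew3 (t : List Char) (a b c x y z : Char) :
    PySem.Chars.endswith (t.reverse ++ [c, b, a]) [x, y, z]
      = (decide (c = x) && decide (b = y) && decide (a = z)) := by
  rw [Bool.eq_iff_iff]
  simp only [Bool.and_eq_true, decide_eq_true_eq]
  rw [PySem.Chars.endswith_iff,
      show t.reverse ++ [c, b, a] = (a :: b :: c :: t).reverse by simp,
      show ([x, y, z] : List Char) = ([z, y, x] : List Char).reverse from rfl,
      List.reverse_suffix]
  simp [List.cons_prefix_cons]
  tauto

theorem pv_ew3' (D : List Char) (u v w x y z : Char) :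
    PySem.Chars.endswith (D ++ [u, v, w]) [x, y, z]
      = (decide (u = x) && decide (v = y) && decide (w = z)) := by
  have h := pv_ew3 D.reverse w v u x y z
  simpa using h

theorem pv_slice3 (xs : List Char) (u v w : Char) :
    PySem.List.slice (xs ++ [u, v, w]) none (some (-3)) = xs := by
  simp [PySem.List.slice, PySem.List.clampIdx]

-- the loop returns false when every matching suffix yields a failing base and the
-- fall-through check fails
theorem pv_loop_false (cs : List Char) (L : List (List Char))
    (h1 : ∀ suf ∈ L, PySem.Chars.endswith cs suf = true →
       (PySem.Chars.strIsdigit (PySem.Chars.slice cs none (some (-(suf.length : Int)))) &&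
        ([5, 6].contains (PySem.Chars.slice cs none (some (-(suf.length : Int)))).length)) = false)
    (h2 : (PySem.Chars.strIsdigit cs && ([5, 6].contains cs.length)) = false) :
    pvLoopA cs L = false := by
  induction L with
  | nil => simpa [pvLoopA] using h2
  | cons suf rest ih =>
    simp only [pvLoopA]
    by_cases hE : PySem.Chars.endswith cs suf = true
    · rw [if_pos hE]; exact h1 suf (by simp) hE
    · rw [if_neg (by simp [hE])]
      exact ih (fun s hs => h1 s (by simp [hs]))

-- per-suffix: when condition C fails, a matching '.yz' suffix can only have a failing base
theorem pv_h1 (D : List Char) (x : Char) (rest : List Char)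
    (hDall : D.all PySem.Chars.isdigit = true)
    (hx : PySem.Chars.isdigit x = false)
    (hC : (([5, 6].contains D.length) && ((x == '.') &&
           ([['S','S'], ['S','H'], ['H','K'], ['B','J'], ['S','Z']].contains rest))) = false)
    (y z : Char)
    (hyz : ([['S','S'], ['S','H'], ['H','K'], ['B','J'], ['S','Z']].contains [y, z]) = true) :
    PySem.Chars.endswith (D ++ x :: rest) ['.', y, z] = true →
      (PySem.Chars.strIsdigit (PySem.Chars.slice (D ++ x :: rest) none (some (-3))) &&
       ([5, 6].contains (PySem.Chars.slice (D ++ x :: rest) none (some (-3))).length)) = false := by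
  intro hE
  rw [PySem.Chars.endswith_iff] at hE
  obtain ⟨pre, hpre⟩ := hE
  have hsl : PySem.Chars.slice (D ++ x :: rest) none (some (-3)) = pre := by
    rw [PySem.Chars.slice, ← hpre]
    exact pv_slice3 pre '.' y z
  rw [hsl]
  by_contra hcon
  rw [Bool.not_eq_false, Bool.and_eq_true] at hcon
  obtain ⟨hdig, hlen⟩ := hcon
  have hall : pre.all PySem.Chars.isdigit = true := by
    simp only [PySem.Chars.strIsdigit, Bool.and_eq_true] at hdig
    exact hdig.2
  have h1 := pv_tdw pre [y, z] '.' hall pv_isdigit_dot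
  have h2 := pv_tdw D rest x hDall hx
  rw [hpre] at h1
  have hDpre : D = pre := h2.1.symm.trans h1.1
  have hxr : x :: rest = '.' :: [y, z] := h2.2.symm.trans h1.2
  obtain ⟨hxd, hrest⟩ := List.cons.injEq .. ▸ hxr
  subst hDpre
  simp only [hxd, hrest] at hC
  simp at hC
  obtain ⟨p1, p2, p3, p4, p5⟩ := hC (by simpa using hlen)
  have hyz' := hyz
  simp at hyz'
  tauto

theorem pv_main (cs : List Char) :
    (if cs.isEmpty then false
     else pvLoopA cs [['.','S','S'], ['.','S','H'], ['.','H','K'], ['.','B','J'], ['.','S','Z']])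
    =
    (if ([5, 6].contains (cs.takeWhile PySem.Chars.isdigit).length) = false then false
     else if (cs.takeWhile PySem.Chars.isdigit).length = cs.length then true
     else (PySem.List.pyGet? cs (((cs.takeWhile PySem.Chars.isdigit).length : Nat) : Int) == some '.') &&
          ([['S','S'], ['S','H'], ['H','K'], ['B','J'], ['S','Z']].contains
            (PySem.List.slice cs (some (((cs.takeWhile PySem.Chars.isdigit).length : Int) + 1)) none))) := by
  cases hR : cs.dropWhile PySem.Chars.isdigit with
  | nil =>
    have htk : cs.takeWhile PySem.Chars.isdigit = cs := by
      conv_rhs => rw [← List.takeWhile_append_dropWhile (p := PySem.Chars.isdigit) (l := cs)]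
      rw [hR, List.append_nil]
    have hall : cs.all PySem.Chars.isdigit = true := by rw [← htk]; exact List.all_takeWhile
    have hloop : pvLoopA cs [['.','S','S'], ['.','S','H'], ['.','H','K'], ['.','B','J'], ['.','S','Z']]
        = (PySem.Chars.strIsdigit cs && ([5, 6].contains cs.length)) := by
      simp only [pvLoopA, pv_ew_dot cs hall, Bool.false_eq_true, if_false]
    rw [htk, hloop]
    by_cases hc : ([5, 6].contains cs.length) = true
    · have hne : cs ≠ [] := by
        intro h; rw [h] at hc; exact absurd hc (by decide)
      rw [if_neg (show ¬cs.isEmpty = true by simp [hne]),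
          if_neg (by rw [hc]; simp), if_pos rfl, hc, Bool.and_true]
      simp [PySem.Chars.strIsdigit, hall, hne]
    · have hc' : ([5, 6].contains cs.length) = false := by simpa using hc
      rw [if_pos hc', hc', Bool.and_false]
      simp
  | cons x rest =>
    have hcs : cs = (cs.takeWhile PySem.Chars.isdigit) ++ x :: rest := by
      conv_lhs => rw [← List.takeWhile_append_dropWhile (p := PySem.Chars.isdigit) (l := cs)]
      rw [hR]
    have hx : PySem.Chars.isdigit x = false := pv_drop_head cs x rest hR
    generalize hDdef : cs.takeWhile PySem.Chars.isdigit = D at hcs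
    have hDall : D.all PySem.Chars.isdigit = true := by rw [← hDdef]; exact List.all_takeWhile
    have hi_ne : ¬ D.length = cs.length := by rw [hcs]; simp
    have hget : PySem.List.pyGet? cs ((D.length : Nat) : Int) = some x := by
      rw [PySem.List.pyGet?_natCast, hcs, List.getElem?_append_right (le_refl _)]
      simp
    have hslice : PySem.List.slice cs (some ((D.length : Int) + 1)) none = rest := by
      have hc1 : ((D.length : Int) + 1) = (((D.length + 1 : Nat)) : Int) := by push_cast; ring
      rw [hc1, PySem.List.slice_from_natCast, hcs]
      have hd := List.drop_left' (l₁ := D ++ [x]) (l₂ := rest) (i := D.length + 1) (by simp)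
      rw [show D ++ x :: rest = (D ++ [x]) ++ rest by simp]
      exact hd
    have hB : (if ([5, 6].contains D.length) = false then false
         else if D.length = cs.length then true
         else (PySem.List.pyGet? cs ((D.length : Nat) : Int) == some '.') &&
              ([['S','S'], ['S','H'], ['H','K'], ['B','J'], ['S','Z']].contains
                (PySem.List.slice cs (some ((D.length : Int) + 1)) none)))
        = (([5, 6].contains D.length) && ((x == '.') &&
           ([['S','S'], ['S','H'], ['H','K'], ['B','J'], ['S','Z']].contains rest))) := by
      by_cases hc : ([5, 6].contains D.length) = true
      · rw [if_neg (by rw [hc]; simp), if_neg hi_ne, hget, hslice, hc]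
        simp
      · have hc' : ([5, 6].contains D.length) = false := by simpa using hc
        rw [if_pos hc', hc']
        simp
    rw [hB, if_neg (by rw [hcs]; simp)]
    by_cases hC : (([5, 6].contains D.length) && ((x == '.') &&
           ([['S','S'], ['S','H'], ['H','K'], ['B','J'], ['S','Z']].contains rest))) = true
    · rw [hC]
      rw [Bool.and_eq_true, Bool.and_eq_true, beq_iff_eq] at hC
      obtain ⟨hc5, hxd, hmem⟩ := hC
      have hne : D.isEmpty = false := by
        cases D with
        | nil => exact absurd hc5 (by decide)
        | cons a t => simp
      subst hxd
      have hmem' : rest = ['S','S'] ∨ rest = ['S','H'] ∨ rest = ['H','K'] ∨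
          rest = ['B','J'] ∨ rest = ['S','Z'] := by simpa using hmem
      rcases hmem' with rfl | rfl | rfl | rfl | rfl <;>
        · rw [hcs]
          simp [pvLoopA, pv_ew3', pv_slice3, PySem.Chars.slice, PySem.Chars.strIsdigit,
            hDall, hne]
          exact (by simpa using hc5)
    · have hCf : (([5, 6].contains D.length) && ((x == '.') &&
           ([['S','S'], ['S','H'], ['H','K'], ['B','J'], ['S','Z']].contains rest))) = false := by
        simpa using hC
      rw [hCf]
      apply pv_loop_false
      · intro suf hsuf hE
        rw [hcs] at hE ⊢
        simp only [List.mem_cons, List.not_mem_nil, or_false] at hsuf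
        rcases hsuf with rfl | rfl | rfl | rfl | rfl <;>
          · simp only [List.length_cons, List.length_nil]
            have hh := pv_h1 D x rest hDall hx hCf _ _ (by decide) hE
            simpa using hh

      · rw [hcs]
        simp [PySem.Chars.strIsdigit, List.all_append, hx]

-- ===== VERDICT (by name: the statement is the Claim_ definition above) =====
theorem is_valid_symbol_py_spec : Claim_equal_is_valid_symbol_py := by
  intro q _
  unfold Spec_is_valid_symbol_py
  simp only [is_valid_symbol_py, is_valid_symbol_py_alt]
  exact pv_main q.toList
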